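-- pv_equiv track=rewrite | github.com/NicholasAntoniadesEngineer/llm_game | orchestration/placement.py | _cardinally_adjacent_to_set
-- ===== SOURCE A (Python) =====
-- def _cardinally_adjacent_to_set(footprint: set[tuple[int, int]], target: set[tuple[int, int]]) -> bool:
--     if not footprint or not target:
--         return False
--     for x, y in footprint:
--         for nx, ny in ((x + 1, y), (x - 1, y), (x, y + 1), (x, y - 1)):
--             if (nx, ny) in target:
--                 return True
--     return False
-- ===== SOURCE B (Python) =====
-- def _cardinally_adjacent_to_set(footprint: set[tuple[int, int]], target: set[tuple[int, int]]) -> bool: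
--     return any(abs(x - tx) + abs(y - ty) == 1
--                for x, y in footprint
--                for tx, ty in target)
-- ===== Notes on version B (the rewrite author's own statement) =====
-- stated objective: alternative
-- what changed: B drops the neighbor-tuple generation and set membership probes entirely: it tests every footprint/target pair directly with the Manhattan-distance-1 predicate (cardinal adjacency), and the empty-input guard becomes implicit in the empty pairwise scan.
import Mathlib
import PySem

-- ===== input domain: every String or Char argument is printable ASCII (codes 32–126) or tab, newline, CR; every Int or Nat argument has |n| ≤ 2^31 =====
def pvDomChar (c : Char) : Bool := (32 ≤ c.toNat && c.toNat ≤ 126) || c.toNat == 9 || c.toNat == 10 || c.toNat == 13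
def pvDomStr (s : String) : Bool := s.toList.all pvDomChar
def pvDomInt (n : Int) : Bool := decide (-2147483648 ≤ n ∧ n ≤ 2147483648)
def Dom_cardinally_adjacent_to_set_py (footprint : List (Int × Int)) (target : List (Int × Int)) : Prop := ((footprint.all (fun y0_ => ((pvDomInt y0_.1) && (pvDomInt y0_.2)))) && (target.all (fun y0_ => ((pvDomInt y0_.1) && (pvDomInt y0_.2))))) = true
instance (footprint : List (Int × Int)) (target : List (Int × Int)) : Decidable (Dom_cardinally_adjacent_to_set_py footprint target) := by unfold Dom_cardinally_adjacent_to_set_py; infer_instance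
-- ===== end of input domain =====

-- B replaces A's per-footprint-cell neighbor generation and set-membership probes (with an
-- explicit empty guard) by a direct pairwise Manhattan-distance-1 test over both sets (alternative).


-- ===== PORT A =====
def cardinally_adjacent_to_set_py (footprint : List (Int × Int)) (target : List (Int × Int)) : Bool :=
  if footprint.isEmpty || target.isEmpty then false
  else
    footprint.any (fun p =>
      [(p.1 + 1, p.2), (p.1 - 1, p.2), (p.1, p.2 + 1), (p.1, p.2 - 1)].any
        (fun q => PySem.Set.contains target q))

-- ===== PORT B =====
def cardinally_adjacent_to_set_py_alt (footprint : List (Int × Int)) (target : List (Int × Int)) : Bool :=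
  footprint.any (fun p => target.any (fun t => (p.1 - t.1).natAbs + (p.2 - t.2).natAbs == 1))

-- ===== PRECONDITION & SPEC =====
def Spec_cardinally_adjacent_to_set_py (footprint : List (Int × Int)) (target : List (Int × Int)) (out : Bool) : Prop := out = cardinally_adjacent_to_set_py_alt footprint target
instance (footprint : List (Int × Int)) (target : List (Int × Int)) (out : Bool) : Decidable (Spec_cardinally_adjacent_to_set_py footprint target out) := by unfold Spec_cardinally_adjacent_to_set_py; infer_instance

-- ===== CLAIM (what is proved, stated in full; the proofs are below) =====
def Claim_equal_cardinally_adjacent_to_set_py : Prop := ∀ (footprint : List (Int × Int)) (target : List (Int × Int)), Dom_cardinally_adjacent_to_set_py footprint target → Spec_cardinally_adjacent_to_set_py footprint target (cardinally_adjacent_to_set_py footprint target)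

-- ===== LEMMAS AND PROOFS =====

-- a cell t is among the four cardinal neighbors of p iff their Manhattan distance is 1
theorem nbr_iff_dist_one (p t : Int × Int) :
    (t ∈ [(p.1 + 1, p.2), (p.1 - 1, p.2), (p.1, p.2 + 1), (p.1, p.2 - 1)]) ↔
    (p.1 - t.1).natAbs + (p.2 - t.2).natAbs = 1 := by
  obtain ⟨a, b⟩ := p
  obtain ⟨c, d⟩ := t
  simp [Prod.ext_iff]
  omega

-- ===== VERDICT (by name: the statement is the Claim_ definition above) =====
theorem cardinally_adjacent_to_set_py_spec : Claim_equal_cardinally_adjacent_to_set_py := by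
  intro footprint target _
  unfold Spec_cardinally_adjacent_to_set_py cardinally_adjacent_to_set_py cardinally_adjacent_to_set_py_alt
  rcases footprint with _ | ⟨p, fs⟩
  · simp
  rcases target with _ | ⟨t, ts⟩
  · simp
  rw [List.isEmpty_cons, List.isEmpty_cons, Bool.or_self, if_neg (by decide)]
  rw [Bool.eq_iff_iff]
  simp only [List.any_eq_true, PySem.Set.contains_iff, beq_iff_eq]
  constructor
  · rintro ⟨q, hq, r, hr, hrt⟩
    exact ⟨q, hq, r, hrt, (nbr_iff_dist_one q r).mp hr⟩
  · rintro ⟨q, hq, r, hrt, hd⟩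
    exact ⟨q, hq, r, (nbr_iff_dist_one q r).mpr hd, hrt⟩
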